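-- pv_equiv track=rewrite | github.com/fkie-cad/Logprep | logprep/util/processor_stats.py | _get_sorted_output_dict
-- ===== SOURCE A (Python) =====
-- from collections import OrderedDict, namedtuple
--
-- def _get_sorted_output_dict(filtered_data: dict) -> OrderedDict:
--     sorted_data = OrderedDict(sorted(filtered_data.items()))
--     ordered_data = OrderedDict()
--     used_keys = []
--     for key, value in sorted_data.items():
--         if key.startswith("MultiprocessingPipeline"):
--             ordered_data[key] = value
--             used_keys.append(key)
--     for key, value in filtered_data.items():
--         if key in ("errors", "warnings", "error_types", "warning_types", "processed"):
--             ordered_data[key] = value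
--             used_keys.append(key)
--     for key, value in sorted_data.items():
--         if key not in used_keys:
--             ordered_data[key] = value
--     return ordered_data
-- ===== SOURCE B (Python) =====
-- from collections import OrderedDict
--
-- def _get_sorted_output_dict(filtered_data: dict) -> OrderedDict:
--     def prio(key):
--         if key.startswith("MultiprocessingPipeline"):
--             return (0, key)
--         if key in ("errors", "warnings", "error_types", "warning_types", "processed"):
--             return (1, "")
--         return (2, key)
--     return OrderedDict(sorted(filtered_data.items(), key=lambda kv: prio(kv[0])))
-- ===== Notes on version B (the rewrite author's own statement) =====
-- stated objective: idiomatic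
-- what changed: A builds the result by sorting the whole dict and making three passes that insert into an OrderedDict while tracking a used_keys dedup list; B makes no passes at all: it computes a single composite priority key (0,key)/(1,'')/(2,key) per key and does one stable keyed sort of the items.
import Mathlib
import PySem

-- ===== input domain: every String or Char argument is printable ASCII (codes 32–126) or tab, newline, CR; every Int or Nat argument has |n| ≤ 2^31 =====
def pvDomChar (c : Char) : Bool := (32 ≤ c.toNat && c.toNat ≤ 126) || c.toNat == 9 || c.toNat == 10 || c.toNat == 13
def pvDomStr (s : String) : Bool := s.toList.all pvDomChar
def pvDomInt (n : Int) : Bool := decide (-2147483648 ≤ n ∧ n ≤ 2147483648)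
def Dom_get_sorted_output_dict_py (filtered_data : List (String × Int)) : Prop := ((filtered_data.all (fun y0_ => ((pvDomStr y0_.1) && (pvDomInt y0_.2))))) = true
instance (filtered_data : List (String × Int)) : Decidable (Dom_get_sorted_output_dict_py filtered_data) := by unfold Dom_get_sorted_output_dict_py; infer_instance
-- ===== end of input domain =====

-- B replaces A's full sort plus three dict-building passes with a used_keys dedup list by a
-- single stable sort under a computed composite priority key (objective: idiomatic).

-- ===== PORT A =====
def pvPipe (k : String) : Bool := PySem.Str.startswith k "MultiprocessingPipeline"
def pvSpec (k : String) : Bool :=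
  k == "errors" || k == "warnings" || k == "error_types" || k == "warning_types" || k == "processed"

def get_sorted_output_dict_py (filtered_data : List (String × Int)) : List (String × Int) :=
  let sorted_data := PySem.List.sorted2 filtered_data (fun kv => kv.1) (fun kv => kv.2)
  let st1 := sorted_data.foldl
    (fun (acc : PySem.Dict String Int × List String) kv =>
      if pvPipe kv.1 then (acc.1.insert kv.1 kv.2, acc.2 ++ [kv.1]) else acc)
    (PySem.Dict.empty, [])
  let st2 := filtered_data.foldl
    (fun (acc : PySem.Dict String Int × List String) kv =>
      if pvSpec kv.1 then (acc.1.insert kv.1 kv.2, acc.2 ++ [kv.1]) else acc)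
    st1
  let ordered_data := sorted_data.foldl
    (fun (d : PySem.Dict String Int) kv =>
      if !(st2.2.contains kv.1) then d.insert kv.1 kv.2 else d)
    st2.1
  ordered_data.items

-- ===== PORT B =====
-- prio(key) = (0, key) for pipeline keys, (1, "") for the special keys, (2, key) otherwise
def pvRank (k : String) : Int := if pvPipe k then 0 else if pvSpec k then 1 else 2
def pvSec (k : String) : String := if pvPipe k then k else if pvSpec k then "" else k

def get_sorted_output_dict_py_alt (filtered_data : List (String × Int)) : List (String × Int) :=
  PySem.List.sorted2 filtered_data (fun kv => pvRank kv.1) (fun kv => pvSec kv.1)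

-- ===== PRECONDITION & SPEC =====
-- Pre_ excludes association lists with duplicate keys: no Python dictionary argument of A is
-- represented by such a list, so no behaviour of A is being hidden.
def Pre_get_sorted_output_dict_py (filtered_data : List (String × Int)) : Prop :=
  (filtered_data.map Prod.fst).Nodup
instance (filtered_data : List (String × Int)) : Decidable (Pre_get_sorted_output_dict_py filtered_data) := by
  unfold Pre_get_sorted_output_dict_py; infer_instance
def pvWitness_get_sorted_output_dict_py : (List (String × Int)) :=
  [("processed", 7), ("MultiprocessingPipeline-1", 3), ("alpha", 1)]
def Spec_get_sorted_output_dict_py (filtered_data : List (String × Int)) (out : List (String × Int)) : Prop := out = get_sorted_output_dict_py_alt filtered_data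
instance (filtered_data : List (String × Int)) (out : List (String × Int)) : Decidable (Spec_get_sorted_output_dict_py filtered_data out) := by unfold Spec_get_sorted_output_dict_py; infer_instance

-- ===== CLAIM (what is proved, stated in full; the proofs are below) =====
def Claim_equal_get_sorted_output_dict_py : Prop := ∀ (filtered_data : List (String × Int)), Dom_get_sorted_output_dict_py filtered_data → Pre_get_sorted_output_dict_py filtered_data → Spec_get_sorted_output_dict_py filtered_data (get_sorted_output_dict_py filtered_data)

-- ===== LEMMAS AND PROOFS =====

-- the comparator of A's sorted2 … (·.1) (·.2) (Python's tuple comparison on the pairs)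
def pvLex (a b : String × Int) : Bool :=
  decide (a.1 < b.1) || (!decide (b.1 < a.1) && decide (a.2 < b.2))

-- the comparator of B's sorted2 under the composite priority key
def pvPLt (a b : String × Int) : Bool :=
  decide (pvRank a.1 < pvRank b.1) || (!decide (pvRank b.1 < pvRank a.1) && decide (pvSec a.1 < pvSec b.1))

theorem pv_sorted2_eq (xs : List (String × Int)) :
    PySem.List.sorted2 xs (fun kv => kv.1) (fun kv => kv.2) =
    xs.foldl (fun acc x => PySem.List.insertBy pvLex x acc) [] := rfl

theorem pv_sorted2p_eq (xs : List (String × Int)) :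
    PySem.List.sorted2 xs (fun kv => pvRank kv.1) (fun kv => pvSec kv.1) =
    xs.foldl (fun acc x => PySem.List.insertBy pvPLt x acc) [] := rfl

-- generic: insertion sort with a comparator that decides a transitive total relation is Pairwise in it
theorem pv_insertBy_pairwise {α : Type} (c : α → α → Bool) (R : α → α → Prop)
    (hT : ∀ a b d, R a b → R b d → R a d)
    (h1 : ∀ a b, c a b = true → R a b) (h2 : ∀ a b, c a b = false → R b a)
    {x : α} {ys : List α} (h : ys.Pairwise R) :
    (PySem.List.insertBy c x ys).Pairwise R := by
  induction ys with
  | nil => simp [PySem.List.insertBy]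
  | cons y t ih =>
    rw [List.pairwise_cons] at h
    obtain ⟨hy, ht⟩ := h
    cases hxy : c x y with
    | true =>
      rw [show PySem.List.insertBy c x (y :: t) = x :: y :: t by simp [PySem.List.insertBy, hxy]]
      refine List.Pairwise.cons ?_ (List.Pairwise.cons hy ht)
      intro z hz
      rcases List.mem_cons.mp hz with rfl | hz
      · exact h1 _ _ hxy
      · exact hT _ _ _ (h1 _ _ hxy) (hy z hz)
    | false =>
      rw [show PySem.List.insertBy c x (y :: t) = y :: PySem.List.insertBy c x t by simp [PySem.List.insertBy, hxy]]
      refine List.Pairwise.cons ?_ (ih ht)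
      intro z hz
      rcases (PySem.List.mem_insertBy c x z t).mp hz with rfl | hz
      · exact h2 _ _ hxy
      · exact hy z hz

theorem pv_foldl_insertBy_pairwise {α : Type} (c : α → α → Bool) (R : α → α → Prop)
    (hT : ∀ a b d, R a b → R b d → R a d)
    (h1 : ∀ a b, c a b = true → R a b) (h2 : ∀ a b, c a b = false → R b a)
    (xs : List α) (acc : List α) (h : acc.Pairwise R) :
    (xs.foldl (fun acc x => PySem.List.insertBy c x acc) acc).Pairwise R := by
  induction xs generalizing acc with
  | nil => simpa using h
  | cons x t ih => exact ih _ (pv_insertBy_pairwise c R hT h1 h2 h)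

theorem pvLex_le_of_true {a b : String × Int} (h : pvLex a b = true) : a.1 ≤ b.1 := by
  by_cases hba : b.1 < a.1
  · exfalso; unfold pvLex at h; simp [hba, asymm hba] at h
  · exact le_of_not_gt hba

theorem pvLex_le_of_false {a b : String × Int} (h : pvLex a b = false) : b.1 ≤ a.1 := by
  by_cases hab : a.1 < b.1
  · exfalso; unfold pvLex at h; simp [hab] at h
  · exact le_of_not_gt hab

theorem pv_sorted2_pairwise (xs : List (String × Int)) :
    (PySem.List.sorted2 xs (fun kv => kv.1) (fun kv => kv.2)).Pairwise (fun a b => a.1 ≤ b.1) := by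
  rw [pv_sorted2_eq]
  exact pv_foldl_insertBy_pairwise pvLex (fun a b => a.1 ≤ b.1) (fun _ _ _ => le_trans)
    (fun _ _ => pvLex_le_of_true) (fun _ _ => pvLex_le_of_false) xs [] List.Pairwise.nil

-- the lexicographic order B's comparator decides
def pvPR (a b : String × Int) : Prop :=
  pvRank a.1 < pvRank b.1 ∨ (pvRank a.1 = pvRank b.1 ∧ pvSec a.1 ≤ pvSec b.1)

theorem pvPR_trans (a b d : String × Int) (h1 : pvPR a b) (h2 : pvPR b d) : pvPR a d := by
  rcases h1 with h1 | ⟨h1, h1'⟩ <;> rcases h2 with h2 | ⟨h2, h2'⟩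
  · exact Or.inl (lt_trans h1 h2)
  · exact Or.inl (h2 ▸ h1)
  · exact Or.inl (h1 ▸ h2)
  · exact Or.inr ⟨h1.trans h2, le_trans h1' h2'⟩

theorem pvPLt_of_true {a b : String × Int} (h : pvPLt a b = true) : pvPR a b := by
  unfold pvPLt at h
  rcases Bool.or_eq_true_iff.mp h with h | h
  · exact Or.inl (of_decide_eq_true h)
  · obtain ⟨h1, h2⟩ := Bool.and_eq_true_iff.mp h
    have h1' : ¬ pvRank b.1 < pvRank a.1 := of_decide_eq_false (by simpa using h1)
    by_cases hr : pvRank a.1 < pvRank b.1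
    · exact Or.inl hr
    · exact Or.inr ⟨le_antisymm (not_lt.mp h1') (not_lt.mp hr), le_of_lt (of_decide_eq_true h2)⟩

theorem pvPLt_of_false {a b : String × Int} (h : pvPLt a b = false) : pvPR b a := by
  unfold pvPLt at h
  obtain ⟨h1, h2⟩ := Bool.or_eq_false_iff.mp h
  have h1' : ¬ pvRank a.1 < pvRank b.1 := of_decide_eq_false h1
  by_cases hr : pvRank b.1 < pvRank a.1
  · exact Or.inl hr
  · rcases Bool.and_eq_false_iff.mp h2 with h3 | h3
    · exact absurd (of_decide_eq_true (by simpa using h3 : decide (pvRank b.1 < pvRank a.1) = true)) hr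
    · exact Or.inr ⟨le_antisymm (not_lt.mp h1') (not_lt.mp hr),
        not_lt.mp (of_decide_eq_false h3)⟩

theorem pv_sorted2p_pairwise (xs : List (String × Int)) :
    (PySem.List.sorted2 xs (fun kv => pvRank kv.1) (fun kv => pvSec kv.1)).Pairwise pvPR := by
  rw [pv_sorted2p_eq]
  exact pv_foldl_insertBy_pairwise pvPLt pvPR pvPR_trans
    (fun _ _ => pvPLt_of_true) (fun _ _ => pvPLt_of_false) xs [] List.Pairwise.nil

theorem pv_ne_pairwise {l : List (String × Int)} (h : (l.map Prod.fst).Nodup) :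
    l.Pairwise (fun a b => a.1 ≠ b.1) := (List.pairwise_map).mp h

theorem pv_eq_of_perm_strict {l₁ l₂ : List (String × Int)} (hp : l₁.Perm l₂)
    (h1 : l₁.Pairwise (fun a b => a.1 < b.1)) (h2 : l₂.Pairwise (fun a b => a.1 < b.1)) : l₁ = l₂ :=
  List.Perm.eq_of_pairwise (fun _ _ _ _ hab hba => absurd (lt_trans hab hba) (lt_irrefl _)) h1 h2 hp

-- spec keys never carry the pipeline prefix, and vice versa
theorem pv_spec_not_pipe {k : String} (h : pvSpec k = true) : pvPipe k = false := by
  unfold pvSpec at h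
  simp only [Bool.or_eq_true, beq_iff_eq] at h
  rcases h with ((((rfl | rfl) | rfl) | rfl) | rfl) <;> decide

theorem pv_pipe_not_spec {k : String} (h : pvPipe k = true) : pvSpec k = false := by
  cases hq : pvSpec k with
  | false => rfl
  | true => rw [pv_spec_not_pipe hq] at h; exact absurd h (by simp)

theorem pvRank_pipe {k : String} (h : pvPipe k = true) : pvRank k = 0 := by
  simp [pvRank, h]
theorem pvRank_spec {k : String} (h : pvSpec k = true) : pvRank k = 1 := by
  simp [pvRank, pv_spec_not_pipe h, h]
theorem pvRank_rest {k : String} (h1 : pvPipe k = false) (h2 : pvSpec k = false) : pvRank k = 2 := by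
  simp [pvRank, h1, h2]
theorem pvSec_pipe {k : String} (h : pvPipe k = true) : pvSec k = k := by
  simp [pvSec, h]
theorem pvSec_spec {k : String} (h : pvSpec k = true) : pvSec k = "" := by
  simp [pvSec, pv_spec_not_pipe h, h]
theorem pvSec_rest {k : String} (h1 : pvPipe k = false) (h2 : pvSpec k = false) : pvSec k = k := by
  simp [pvSec, h1, h2]

-- insertBy distributes over ++ when the new element goes strictly before the whole right part …
theorem pv_insertBy_append_right {α : Type} (c : α → α → Bool) (x : α) (A B : List α)
    (h : ∀ b ∈ B, c x b = true) :
    PySem.List.insertBy c x (A ++ B) = PySem.List.insertBy c x A ++ B := by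
  induction A with
  | nil =>
    cases B with
    | nil => simp
    | cons b t => simp [PySem.List.insertBy, h b (by simp)]
  | cons a A' ih =>
    cases hxa : c x a with
    | true => simp [PySem.List.insertBy, hxa]
    | false => simp [PySem.List.insertBy, hxa, ih]

-- … and when it goes strictly after the whole left part
theorem pv_insertBy_append_left {α : Type} (c : α → α → Bool) (x : α) (A B : List α)
    (h : ∀ a ∈ A, c x a = false) :
    PySem.List.insertBy c x (A ++ B) = A ++ PySem.List.insertBy c x B := by
  induction A with
  | nil => simp
  | cons a A' ih =>
    have hxa := h a (by simp)
    simp only [List.cons_append]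
    rw [show PySem.List.insertBy c x (a :: (A' ++ B)) = a :: PySem.List.insertBy c x (A' ++ B) by
      simp [PySem.List.insertBy, hxa]]
    rw [ih (fun a ha => h a (by simp [ha]))]

-- STABILITY: one keyed sort splits into the three rank groups, the tied middle group in list order
theorem pv_B_split (xs : List (String × Int)) :
    PySem.List.sorted2 xs (fun kv => pvRank kv.1) (fun kv => pvSec kv.1) =
      PySem.List.sorted2 (xs.filter (fun kv => pvPipe kv.1)) (fun kv => pvRank kv.1) (fun kv => pvSec kv.1)
      ++ xs.filter (fun kv => pvSpec kv.1)
      ++ PySem.List.sorted2 (xs.filter (fun kv => !pvPipe kv.1 && !pvSpec kv.1)) (fun kv => pvRank kv.1) (fun kv => pvSec kv.1) := by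
  induction xs using List.reverseRecOn with
  | nil => rfl
  | append_singleton xs x ih =>
    have hfold : ∀ (l : List (String × Int)),
        PySem.List.sorted2 (l ++ [x]) (fun kv => pvRank kv.1) (fun kv => pvSec kv.1)
        = PySem.List.insertBy pvPLt x (PySem.List.sorted2 l (fun kv => pvRank kv.1) (fun kv => pvSec kv.1)) := by
      intro l; rw [pv_sorted2p_eq, pv_sorted2p_eq, List.foldl_append]; rfl
    set G0 := PySem.List.sorted2 (xs.filter (fun kv => pvPipe kv.1)) (fun kv => pvRank kv.1) (fun kv => pvSec kv.1) with hG0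
    set G1 := xs.filter (fun kv => pvSpec kv.1) with hG1
    set G2 := PySem.List.sorted2 (xs.filter (fun kv => !pvPipe kv.1 && !pvSpec kv.1)) (fun kv => pvRank kv.1) (fun kv => pvSec kv.1) with hG2
    have hm0 : ∀ a ∈ G0, pvPipe a.1 = true := by
      intro a ha
      rw [hG0] at ha
      have := (PySem.List.sorted2_perm _ _ _ _).mem_iff.mp ha
      exact (List.mem_filter.mp this).2
    have hm1 : ∀ a ∈ G1, pvSpec a.1 = true := by
      intro a ha
      rw [hG1] at ha
      exact (List.mem_filter.mp ha).2
    have hm2 : ∀ a ∈ G2, pvPipe a.1 = false ∧ pvSpec a.1 = false := by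
      intro a ha
      rw [hG2] at ha
      have := (PySem.List.sorted2_perm _ _ _ _).mem_iff.mp ha
      have h := (List.mem_filter.mp this).2
      simp only [Bool.and_eq_true, Bool.not_eq_true'] at h
      exact h
    rw [hfold, ih, List.filter_append, List.filter_append, List.filter_append]
    by_cases hp : pvPipe x.1 = true
    · have hs : pvSpec x.1 = false := pv_pipe_not_spec hp
      have hlt : ∀ b ∈ G1 ++ G2, pvPLt x b = true := by
        intro b hb
        unfold pvPLt
        rcases List.mem_append.mp hb with hb | hb
        · rw [pvRank_pipe hp, pvRank_spec (hm1 b hb)]; simp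
        · rw [pvRank_pipe hp, pvRank_rest (hm2 b hb).1 (hm2 b hb).2]; simp
      rw [List.append_assoc, pv_insertBy_append_right pvPLt x G0 (G1 ++ G2) hlt]
      simp [hp, hs, hfold, hG0, hG1, hG2, List.append_assoc]
    · have hp' : pvPipe x.1 = false := by simpa using hp
      by_cases hs : pvSpec x.1 = true
      · have hge : ∀ a ∈ G0 ++ G1, pvPLt x a = false := by
          intro a ha
          unfold pvPLt
          rcases List.mem_append.mp ha with ha | ha
          · rw [pvRank_spec hs, pvRank_pipe (hm0 a ha)]; simp
          · rw [pvRank_spec hs, pvRank_spec (hm1 a ha), pvSec_spec hs, pvSec_spec (hm1 a ha)]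
            simp
        have hlt : ∀ b ∈ G2, pvPLt x b = true := by
          intro b hb
          unfold pvPLt
          rw [pvRank_spec hs, pvRank_rest (hm2 b hb).1 (hm2 b hb).2]; simp
        have hins : PySem.List.insertBy pvPLt x G2 = x :: G2 := by
          have h := pv_insertBy_append_right pvPLt x [] G2 hlt
          simpa [PySem.List.insertBy] using h
        rw [pv_insertBy_append_left pvPLt x (G0 ++ G1) G2 hge, hins]
        simp [hp', hs, hG0, hG1, hG2, List.append_assoc]
      · have hs' : pvSpec x.1 = false := by simpa using hs
        have hge : ∀ a ∈ G0 ++ G1, pvPLt x a = false := by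
          intro a ha
          unfold pvPLt
          rcases List.mem_append.mp ha with ha | ha
          · rw [pvRank_rest hp' hs', pvRank_pipe (hm0 a ha)]; simp
          · rw [pvRank_rest hp' hs', pvRank_spec (hm1 a ha)]; simp
        rw [pv_insertBy_append_left pvPLt x (G0 ++ G1) G2 hge]
        simp [hp', hs', hfold, hG0, hG1, hG2, List.append_assoc]

-- filter of A's stable sort = stable sort of the filter, for distinct keys
theorem pv_group_eq (xs : List (String × Int)) (p : String × Int → Bool)
    (hnd : (xs.map Prod.fst).Nodup) :
    (PySem.List.sorted2 xs (fun kv => kv.1) (fun kv => kv.2)).filter p =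
    PySem.List.sorted2 (xs.filter p) (fun kv => kv.1) (fun kv => kv.2) := by
  have hS : (PySem.List.sorted2 xs (fun kv => kv.1) (fun kv => kv.2)).Perm xs :=
    PySem.List.sorted2_perm _ _ _ _
  have hS' : (PySem.List.sorted2 (xs.filter p) (fun kv => kv.1) (fun kv => kv.2)).Perm (xs.filter p) :=
    PySem.List.sorted2_perm _ _ _ _
  have hsymm : ∀ {a b : String × Int}, a.1 ≠ b.1 → b.1 ≠ a.1 := fun h => h.symm
  have hneS := (hS.pairwise_iff hsymm).mpr (pv_ne_pairwise hnd)
  have hndf : ((xs.filter p).map Prod.fst).Nodup := hnd.sublist ((List.filter_sublist (p := p) (l := xs)).map Prod.fst)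
  have hneS' := (hS'.pairwise_iff hsymm).mpr (pv_ne_pairwise hndf)
  refine pv_eq_of_perm_strict ((hS.filter p).trans hS'.symm) ?_ ?_
  · exact (((pv_sorted2_pairwise xs).filter p).and (hneS.filter p)).imp
      (fun h => lt_of_le_of_ne h.1 h.2)
  · exact ((pv_sorted2_pairwise (xs.filter p)).and hneS').imp (fun h => lt_of_le_of_ne h.1 h.2)

-- within a single-rank group where the secondary key is the key itself, both sorts agree
theorem pv_sort_agree (l : List (String × Int)) (hnd : (l.map Prod.fst).Nodup)
    (hk : ∀ a ∈ l, pvRank a.1 = pvRank a.1 ∧ pvSec a.1 = a.1)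
    (hr : ∀ a ∈ l, ∀ b ∈ l, pvRank a.1 = pvRank b.1) :
    PySem.List.sorted2 l (fun kv => kv.1) (fun kv => kv.2) =
    PySem.List.sorted2 l (fun kv => pvRank kv.1) (fun kv => pvSec kv.1) := by
  have hp1 : (PySem.List.sorted2 l (fun kv => kv.1) (fun kv => kv.2)).Perm l :=
    PySem.List.sorted2_perm _ _ _ _
  have hp2 : (PySem.List.sorted2 l (fun kv => pvRank kv.1) (fun kv => pvSec kv.1)).Perm l :=
    PySem.List.sorted2_perm _ _ _ _
  have hsymm : ∀ {a b : String × Int}, a.1 ≠ b.1 → b.1 ≠ a.1 := fun h => h.symm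
  have hne1 := (hp1.pairwise_iff hsymm).mpr (pv_ne_pairwise hnd)
  have hne2 := (hp2.pairwise_iff hsymm).mpr (pv_ne_pairwise hnd)
  refine pv_eq_of_perm_strict (hp1.trans hp2.symm) ?_ ?_
  · exact ((pv_sorted2_pairwise l).and hne1).imp (fun h => lt_of_le_of_ne h.1 h.2)
  · have hle : (PySem.List.sorted2 l (fun kv => pvRank kv.1) (fun kv => pvSec kv.1)).Pairwise
        (fun a b => a.1 ≤ b.1) := by
      refine ((pv_sorted2p_pairwise l).imp_of_mem ?_)
      intro a b ha hb hR
      have ha' := hp2.mem_iff.mp ha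
      have hb' := hp2.mem_iff.mp hb
      rcases hR with hR | ⟨_, hR⟩
      · exact absurd (hr a ha' b hb' ▸ hR) (lt_irrefl _)
      · rw [(hk a ha').2, (hk b hb').2] at hR; exact hR
    exact (hle.and hne2).imp (fun h => lt_of_le_of_ne h.1 h.2)

-- a 'if p: d[k]=v; u.append(k)' loop is a dict loop and a key-list loop
theorem pv_pair_loop (p : String → Bool) (l : List (String × Int))
    (d0 : PySem.Dict String Int) (u0 : List String) :
    l.foldl (fun (acc : PySem.Dict String Int × List String) kv =>
        if p kv.1 then (acc.1.insert kv.1 kv.2, acc.2 ++ [kv.1]) else acc) (d0, u0)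
    = ((l.filter (fun kv => p kv.1)).foldl (fun d kv => d.insert kv.1 kv.2) d0,
       u0 ++ (l.filter (fun kv => p kv.1)).map (fun kv => kv.1)) := by
  have hf : (fun (acc : PySem.Dict String Int × List String) kv =>
      if p kv.1 then (acc.1.insert kv.1 kv.2, acc.2 ++ [kv.1]) else acc)
      = (fun acc kv => ((fun d (kv : String × Int) => if p kv.1 then d.insert kv.1 kv.2 else d) acc.1 kv,
                        (fun u (kv : String × Int) => if p kv.1 then u ++ [kv.1] else u) acc.2 kv)) := by
    funext acc kv; by_cases h : p kv.1 <;> simp [h]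
  rw [hf, PySem.List.foldl_prod_mk
        (f := fun (d : PySem.Dict String Int) (kv : String × Int) =>
          if p kv.1 then d.insert kv.1 kv.2 else d)
        (g := fun (u : List String) (kv : String × Int) => if p kv.1 then u ++ [kv.1] else u)]
  exact congrArg₂ Prod.mk
    (PySem.List.foldl_if_eq_foldl_filter (fun kv => p kv.1) (fun d kv => d.insert kv.1 kv.2) l d0)
    (PySem.List.foldl_append_if (fun kv => p kv.1) (fun kv => kv.1) l u0)

-- an insert loop over fresh distinct keys appends its pairs
theorem pv_insert_run (l : List (String × Int)) (d : PySem.Dict String Int)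
    (hfresh : ∀ a ∈ l, d.contains a.1 = false) (hndl : (l.map Prod.fst).Nodup) :
    (l.foldl (fun d kv => d.insert kv.1 kv.2) d).items = d.items ++ l := by
  have h := PySem.Dict.items_foldl_insert_fresh l (fun a => a.1) (fun a => a.2) d hfresh hndl
  simpa using h

theorem pv_not_contains {d : PySem.Dict String Int} {its : List (String × Int)}
    (hit : d.items = its) {k : String} (hk : k ∉ its.map Prod.fst) : d.contains k = false := by
  rw [Bool.eq_false_iff]
  intro hc
  have hm := (PySem.Dict.contains_iff_mem_keys d k).mp hc
  simp only [PySem.Dict.keys, hit] at hm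
  exact hk hm

theorem pv_A_eq (xs : List (String × Int)) (hnd : (xs.map Prod.fst).Nodup) :
    get_sorted_output_dict_py xs =
      (PySem.List.sorted2 xs (fun kv => kv.1) (fun kv => kv.2)).filter (fun kv => pvPipe kv.1)
      ++ xs.filter (fun kv => pvSpec kv.1)
      ++ (PySem.List.sorted2 xs (fun kv => kv.1) (fun kv => kv.2)).filter (fun kv => !pvPipe kv.1 && !pvSpec kv.1) := by
  have hS : (PySem.List.sorted2 xs (fun kv => kv.1) (fun kv => kv.2)).Perm xs :=
    PySem.List.sorted2_perm _ _ _ _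
  have hndS : ((PySem.List.sorted2 xs (fun kv => kv.1) (fun kv => kv.2)).map Prod.fst).Nodup :=
    (hS.map Prod.fst).nodup_iff.mpr hnd
  set S := PySem.List.sorted2 xs (fun kv => kv.1) (fun kv => kv.2) with hSdef
  set F1 := S.filter (fun kv => pvPipe kv.1) with hF1
  set F2 := xs.filter (fun kv => pvSpec kv.1) with hF2
  set F3 := S.filter (fun kv => !pvPipe kv.1 && !pvSpec kv.1) with hF3
  -- facts about the groups
  have hmemF1 : ∀ a ∈ F1, pvPipe a.1 = true := fun a ha => (List.mem_filter.mp ha).2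
  have hmemF2 : ∀ a ∈ F2, pvSpec a.1 = true := fun a ha => (List.mem_filter.mp ha).2
  have hmemF3 : ∀ a ∈ F3, pvPipe a.1 = false ∧ pvSpec a.1 = false := by
    intro a ha
    have h := (List.mem_filter.mp ha).2
    simp only [Bool.and_eq_true, Bool.not_eq_true'] at h
    exact h
  have hndF1 : (F1.map Prod.fst).Nodup := hndS.sublist ((List.filter_sublist (l := S)).map Prod.fst)
  have hndF2 : (F2.map Prod.fst).Nodup := hnd.sublist ((List.filter_sublist (l := xs)).map Prod.fst)
  have hndF3 : (F3.map Prod.fst).Nodup := hndS.sublist ((List.filter_sublist (l := S)).map Prod.fst)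
  have hnotF1 : ∀ (k : String), pvPipe k = false → k ∉ F1.map Prod.fst := by
    intro k hk hmem
    rcases List.mem_map.mp hmem with ⟨b, hb, rfl⟩
    rw [hmemF1 b hb] at hk; simp at hk
  have hnotF2 : ∀ (k : String), pvSpec k = false → k ∉ F2.map Prod.fst := by
    intro k hk hmem
    rcases List.mem_map.mp hmem with ⟨b, hb, rfl⟩
    rw [hmemF2 b hb] at hk; simp at hk
  -- unfold A and reduce the three loops
  simp only [get_sorted_output_dict_py]
  rw [← hSdef, pv_pair_loop pvPipe S PySem.Dict.empty [], pv_pair_loop pvSpec xs _ _]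
  rw [← hF1, ← hF2]
  simp only [List.nil_append]
  -- the third loop: its guard is the complement of the first two groups
  have hloop3 : ∀ d : PySem.Dict String Int,
      S.foldl (fun d kv =>
        if !((F1.map (fun kv => kv.1) ++ F2.map (fun kv => kv.1)).contains kv.1)
        then d.insert kv.1 kv.2 else d) d
      = (S.filter (fun kv => !((F1.map (fun kv => kv.1) ++ F2.map (fun kv => kv.1)).contains kv.1))).foldl
          (fun d kv => d.insert kv.1 kv.2) d :=
    fun d => PySem.List.foldl_if_eq_foldl_filter
      (fun kv => !((F1.map (fun kv => kv.1) ++ F2.map (fun kv => kv.1)).contains kv.1))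
      (fun d kv => d.insert kv.1 kv.2) S d
  refine (congrArg PySem.Dict.items (hloop3 _)).trans ?_
  have hU : ∀ kv ∈ S,
      (!((F1.map (fun kv => kv.1) ++ F2.map (fun kv => kv.1)).contains kv.1))
        = (!pvPipe kv.1 && !pvSpec kv.1) := by
    intro kv hkv
    have hx : kv ∈ xs := hS.mem_iff.mp hkv
    have hc : ((F1.map (fun kv => kv.1) ++ F2.map (fun kv => kv.1)).contains kv.1)
        = (pvPipe kv.1 || pvSpec kv.1) := by
      rw [Bool.eq_iff_iff]
      rw [List.contains_iff_mem]
      constructor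
      · intro h
        rcases List.mem_append.mp h with h | h
        · rcases List.mem_map.mp h with ⟨b, hb, hbe⟩
          have hp := hmemF1 b hb
          rw [hbe] at hp
          exact Bool.or_eq_true_iff.mpr (Or.inl hp)
        · rcases List.mem_map.mp h with ⟨b, hb, hbe⟩
          have hp := hmemF2 b hb
          rw [hbe] at hp
          exact Bool.or_eq_true_iff.mpr (Or.inr hp)
      · intro h
        rcases Bool.or_eq_true_iff.mp h with h | h
        · exact List.mem_append.mpr (Or.inl (List.mem_map.mpr ⟨kv, List.mem_filter.mpr ⟨hkv, h⟩, rfl⟩))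
        · exact List.mem_append.mpr (Or.inr (List.mem_map.mpr ⟨kv, List.mem_filter.mpr ⟨hx, h⟩, rfl⟩))
    rw [hc, Bool.not_or]
  rw [List.filter_congr hU, ← hF3]
  -- now three fresh insert runs
  have hit1 : ((F1.foldl (fun d kv => d.insert kv.1 kv.2) PySem.Dict.empty)).items
      = PySem.Dict.empty.items ++ F1 :=
    pv_insert_run F1 PySem.Dict.empty (fun a _ => PySem.Dict.contains_empty a.1) hndF1
  rw [show (PySem.Dict.empty : PySem.Dict String Int).items = [] from rfl, List.nil_append] at hit1
  have hit2 : ((F2.foldl (fun d kv => d.insert kv.1 kv.2)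
        (F1.foldl (fun d kv => d.insert kv.1 kv.2) PySem.Dict.empty))).items
      = F1 ++ F2 := by
    rw [pv_insert_run F2 _
        (fun a ha => pv_not_contains hit1 (hnotF1 a.1 (pv_spec_not_pipe (hmemF2 a ha)))) hndF2, hit1]
  have hit3 : ((F3.foldl (fun d kv => d.insert kv.1 kv.2)
        (F2.foldl (fun d kv => d.insert kv.1 kv.2)
          (F1.foldl (fun d kv => d.insert kv.1 kv.2) PySem.Dict.empty)))).items
      = (F1 ++ F2) ++ F3 := by
    rw [pv_insert_run F3 _ ?_ hndF3, hit2]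
    intro a ha
    refine pv_not_contains hit2 ?_
    rw [List.map_append]
    intro hmem
    rcases List.mem_append.mp hmem with h | h
    · exact hnotF1 a.1 (hmemF3 a ha).1 h
    · exact hnotF2 a.1 (hmemF3 a ha).2 h
  rw [hit3, List.append_assoc]

-- ===== VERDICT (by name: the statement is the Claim_ definition above) =====
theorem get_sorted_output_dict_py_spec : Claim_equal_get_sorted_output_dict_py := by
  intro xs _ hnd
  unfold Spec_get_sorted_output_dict_py get_sorted_output_dict_py_alt
  have hndP : ((xs.filter (fun kv => pvPipe kv.1)).map Prod.fst).Nodup :=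
    hnd.sublist ((List.filter_sublist (l := xs)).map Prod.fst)
  have hndR : ((xs.filter (fun kv => !pvPipe kv.1 && !pvSpec kv.1)).map Prod.fst).Nodup :=
    hnd.sublist ((List.filter_sublist (l := xs)).map Prod.fst)
  rw [pv_A_eq xs hnd, pv_group_eq xs _ hnd, pv_group_eq xs _ hnd, pv_B_split xs]
  rw [pv_sort_agree (xs.filter (fun kv => pvPipe kv.1)) hndP
        (fun a ha => ⟨rfl, pvSec_pipe (List.mem_filter.mp ha).2⟩)
        (fun a ha b hb => by
          rw [pvRank_pipe (List.mem_filter.mp ha).2, pvRank_pipe (List.mem_filter.mp hb).2]),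
      pv_sort_agree (xs.filter (fun kv => !pvPipe kv.1 && !pvSpec kv.1)) hndR
        (fun a ha => by
          have h := (List.mem_filter.mp ha).2
          simp only [Bool.and_eq_true, Bool.not_eq_true'] at h
          exact ⟨rfl, pvSec_rest h.1 h.2⟩)
        (fun a ha b hb => by
          have h1 := (List.mem_filter.mp ha).2
          have h2 := (List.mem_filter.mp hb).2
          simp only [Bool.and_eq_true, Bool.not_eq_true'] at h1 h2
          rw [pvRank_rest h1.1 h1.2, pvRank_rest h2.1 h2.2])]
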